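-- pv_equiv track=rewrite | github.com/YopDude/speedrun-wiki-sync | scripts/gen_mapping.py | should_exclude_wikitext
-- ===== SOURCE A (Python) =====
-- def should_exclude_wikitext(wiki_cat: str, deny: list[str], allow: list[str]) -> bool:
--     """
--     Scoped override semantics (case-insensitive):
--
--     - If no deny matches => keep
--     - If deny matches and no allow matches => exclude
--     - If both match:
--         allow phrases ONLY override the deny terms they contain.
--         Any other deny term still triggers exclusion.
--     """
--     if not deny:
--         return False
--
--     lc = wiki_cat.lower()
--     matched_denies = [d for d in deny if d and d in lc]
--     if not matched_denies:
--         return False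
--
--     matched_allows = [a for a in allow if a and a in lc] if allow else []
--     if not matched_allows:
--         return True
--
--     overridden: set[str] = set()
--     for a in matched_allows:
--         for d in matched_denies:
--             if d in a:
--                 overridden.add(d)
--
--     # Exclude if any matched deny is NOT overridden
--     return any(d not in overridden for d in matched_denies)
-- ===== SOURCE B (Python) =====
-- def should_exclude_wikitext(wiki_cat: str, deny: list[str], allow: list[str]) -> bool:
--     # Different mechanism: fold every matching allow phrase into ONE blob string
--     # joined by NUL (a char that cannot occur in the text inputs), so deciding
--     # whether a deny term is overridden becomes a single substring test against
--     # the blob instead of an inner scan over the allow list.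
--     lc = wiki_cat.lower()
--     blob = "\x00".join(a for a in allow if a and a in lc)
--     return any(d and d in lc and d not in blob for d in deny)
-- ===== Notes on version B (the rewrite author's own statement) =====
-- stated objective: faster
-- what changed: B replaces A's filtered lists, overridden-set build and nested per-deny-per-allow containment scan by joining the matching allow phrases into one NUL-separated blob string, so each deny term's override is decided by a single C-level substring search against the blob.
import Mathlib
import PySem

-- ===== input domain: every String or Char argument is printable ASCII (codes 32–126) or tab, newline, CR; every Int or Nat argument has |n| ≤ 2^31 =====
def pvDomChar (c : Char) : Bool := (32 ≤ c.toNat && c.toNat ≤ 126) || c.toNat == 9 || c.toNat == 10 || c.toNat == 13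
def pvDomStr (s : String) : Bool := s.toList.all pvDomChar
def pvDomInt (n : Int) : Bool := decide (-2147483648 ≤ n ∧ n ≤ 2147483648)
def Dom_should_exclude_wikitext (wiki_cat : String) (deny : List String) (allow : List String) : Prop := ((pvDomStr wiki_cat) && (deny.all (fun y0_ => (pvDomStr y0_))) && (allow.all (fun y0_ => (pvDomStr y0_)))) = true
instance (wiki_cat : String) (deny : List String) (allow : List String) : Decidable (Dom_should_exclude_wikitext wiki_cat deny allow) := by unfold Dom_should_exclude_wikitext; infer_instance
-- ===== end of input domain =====

-- B joins the matching allow phrases into one NUL-separated blob string, so each deny term is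
-- checked as overridden by a single substring test against the blob (measured faster by the timing
-- run; correct on the domain because NUL cannot occur in the inputs).

-- ===== PORT A =====
def should_exclude_wikitext (wiki_cat : String) (deny : List String) (allow : List String) : Bool :=
  if deny = [] then false
  else
    let lc := PySem.Str.lower wiki_cat
    let matched_denies := deny.filter (fun d => !(d == "") && PySem.Str.isIn d lc)
    if matched_denies = [] then false
    else
      let matched_allows := if !(allow == []) then allow.filter (fun a => !(a == "") && PySem.Str.isIn a lc) else []
      if matched_allows = [] then true
      else
        let overridden : PySem.Set String :=
          matched_allows.foldl (fun ov a =>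
            matched_denies.foldl (fun ov d =>
              if PySem.Str.isIn d a then PySem.Set.add ov d else ov) ov) PySem.Set.empty
        matched_denies.any (fun d => !(PySem.Set.contains overridden d))

-- ===== PORT B =====
def should_exclude_wikitext_alt (wiki_cat : String) (deny : List String) (allow : List String) : Bool :=
  let lc := PySem.Str.lower wiki_cat
  let blob := PySem.Str.join "\x00" (allow.filter (fun a => !(a == "") && PySem.Str.isIn a lc))
  deny.any (fun d => !(d == "") && PySem.Str.isIn d lc && !(PySem.Str.isIn d blob))

-- ===== PRECONDITION & SPEC =====
def Spec_should_exclude_wikitext (wiki_cat : String) (deny : List String) (allow : List String) (out : Bool) : Prop := out = should_exclude_wikitext_alt wiki_cat deny allow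
instance (wiki_cat : String) (deny : List String) (allow : List String) (out : Bool) : Decidable (Spec_should_exclude_wikitext wiki_cat deny allow out) := by unfold Spec_should_exclude_wikitext; infer_instance

-- ===== CLAIM (what is proved, stated in full; the proofs are below) =====
def Claim_equal_should_exclude_wikitext : Prop := ∀ (wiki_cat : String) (deny : List String) (allow : List String), Dom_should_exclude_wikitext wiki_cat deny allow → Spec_should_exclude_wikitext wiki_cat deny allow (should_exclude_wikitext wiki_cat deny allow)

-- ===== LEMMAS AND PROOFS =====

-- an element absent from d splits infix-of-(xs ++ sep :: ys) into infix-of-xs or infix-of-ys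
theorem infix_sep_split {α : Type} (d xs ys : List α) (sep : α) (hsep : sep ∉ d) :
    d <:+: xs ++ sep :: ys ↔ d <:+: xs ∨ d <:+: ys := by
  constructor
  · rintro ⟨s, t, h⟩
    have hlen : s.length + d.length + t.length = xs.length + (ys.length + 1) := by
      have := congrArg List.length h
      simpa [Nat.add_assoc, Nat.add_comm, Nat.add_left_comm] using this
    by_cases hc1 : s.length + d.length ≤ xs.length
    · left
      have h1 : s ++ d <+: xs ++ sep :: ys := ⟨t, by simpa [List.append_assoc] using h⟩
      have h2 : xs <+: xs ++ sep :: ys := List.prefix_append _ _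
      have hp : s ++ d <+: xs :=
        List.prefix_of_prefix_length_le h1 h2 (by simp; omega)
      exact (List.suffix_append s d).isInfix.trans hp.isInfix
    · by_cases hc2 : xs.length + 1 ≤ s.length
      · right
        have h1 : d ++ t <:+ xs ++ sep :: ys := ⟨s, by simpa [List.append_assoc] using h⟩
        have h2 : ys <:+ xs ++ sep :: ys := ⟨xs ++ [sep], by simp⟩
        have hs : d ++ t <:+ ys :=
          List.suffix_of_suffix_length_le h1 h2 (by simp; omega)
        exact (List.prefix_append d t).isInfix.trans hs.isInfix
      · exfalso
        have hs1 : s.length ≤ xs.length := by omega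
        have hs2 : xs.length < s.length + d.length := by omega
        have hx : xs.length < (s ++ (d ++ t)).length := by simp; omega
        have e1 : (s ++ (d ++ t))[xs.length]'hx = (d ++ t)[xs.length - s.length]'(by simp; omega) := by
          rw [List.getElem_append_right hs1]
        have e2 : (d ++ t)[xs.length - s.length]'(by simp; omega) = d[xs.length - s.length]'(by omega) :=
          List.getElem_append_left (by omega)
        have e3 : (xs ++ sep :: ys)[xs.length]'(by simp) = sep := by
          rw [List.getElem_append_right (Nat.le_refl _)]
          simp
        have h' : s ++ (d ++ t) = xs ++ sep :: ys := by simpa [List.append_assoc] using h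
        have : d[xs.length - s.length]'(by omega) = sep := by
          rw [← e2, ← e1]
          simp only [h', e3]
        exact hsep (this ▸ List.getElem_mem _)
  · rintro (h | h)
    · exact h.trans (List.prefix_append xs (sep :: ys)).isInfix
    · have hys : ys <:+ xs ++ sep :: ys := ⟨xs ++ [sep], by simp⟩
      exact h.trans hys.isInfix

-- a nonempty, separator-free list is an infix of a sep-joined list iff it is an infix of one part
theorem infix_join_iff (d : List Char) (sep : Char) (ls : List (List Char))
    (hd : d ≠ []) (hsep : sep ∉ d) :
    d <:+: PySem.Chars.join [sep] ls ↔ ∃ l ∈ ls, d <:+: l := by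
  induction ls with
  | nil => simp [PySem.Chars.join_nil, hd]
  | cons l tl ih =>
    cases tl with
    | nil => simp [PySem.Chars.join_singleton]
    | cons l' rest =>
      rw [PySem.Chars.join_cons_cons, List.append_assoc, List.singleton_append,
        infix_sep_split d l _ sep hsep, ih]
      simp

-- membership in the inner fold building `overridden` over the matched denies
theorem mem_inner_fold (a : String) (ds : List String) (ov : List String) (x : String) :
    x ∈ ds.foldl (fun ov d => if PySem.Str.isIn d a then PySem.Set.add ov d else ov) ov ↔
      x ∈ ov ∨ ∃ d ∈ ds, PySem.Str.isIn d a = true ∧ x = d := by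
  induction ds generalizing ov with
  | nil => simp
  | cons d ds ih =>
    simp only [List.foldl_cons]
    rw [ih]
    simp only [List.mem_cons, exists_eq_or_imp]
    by_cases h : PySem.Str.isIn d a = true
    · rw [if_pos h]
      simp only [PySem.Set.mem_add]
      tauto
    · rw [if_neg h]
      tauto

-- membership in the whole `overridden` fold over the matched allows
theorem mem_outer_fold (as ds : List String) (ov : List String) (x : String) :
    x ∈ as.foldl (fun ov a => ds.foldl (fun ov d => if PySem.Str.isIn d a then PySem.Set.add ov d else ov) ov) ov ↔
      x ∈ ov ∨ ∃ a ∈ as, ∃ d ∈ ds, PySem.Str.isIn d a = true ∧ x = d := by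
  induction as generalizing ov with
  | nil => simp
  | cons a as ih =>
    simp only [List.foldl_cons]
    rw [ih, mem_inner_fold]
    simp only [List.mem_cons, exists_eq_or_imp]
    rw [or_assoc]

theorem a_eq_true_iff (wiki_cat : String) (deny allow : List String) :
    should_exclude_wikitext wiki_cat deny allow = true ↔
      ∃ d ∈ deny, (¬ d = "" ∧ PySem.Str.isIn d (PySem.Str.lower wiki_cat) = true) ∧
        ∀ a ∈ allow, ¬(¬ a = "" ∧ PySem.Str.isIn a (PySem.Str.lower wiki_cat) = true ∧
          PySem.Str.isIn d a = true) := by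
  unfold should_exclude_wikitext
  set lc := PySem.Str.lower wiki_cat with hlc
  by_cases hd : deny = []
  · simp [hd]
  · simp only [hd, if_false]
    set md := deny.filter (fun d => !(d == "") && PySem.Str.isIn d lc) with hmd
    by_cases hmd0 : md = []
    · simp only [hmd0, if_true]
      constructor
      · intro h; exact absurd h (by simp)
      · rintro ⟨d, hdm, ⟨hne, hin⟩, _⟩
        have : d ∈ md := by
          rw [hmd]; simp only [List.mem_filter]
          exact ⟨hdm, by simp only [Bool.and_eq_true, Bool.not_eq_true', beq_eq_false_iff_ne]; exact ⟨hne, hin⟩⟩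
        rw [hmd0] at this; simp at this
    · simp only [hmd0, if_false]
      by_cases ha : allow = []
      · simp only [ha]
        simp only [beq_self_eq_true, Bool.not_true, Bool.false_eq_true, if_false, if_true]
        constructor
        · intro _
          obtain ⟨d, hdm⟩ := List.exists_mem_of_ne_nil md hmd0
          have := List.mem_filter.mp (hmd ▸ hdm)
          simp at this
          exact ⟨d, this.1, ⟨this.2.1, by simpa using this.2.2⟩, by simp⟩
        · intro _; trivial
      · set ma := allow.filter (fun a => !(a == "") && PySem.Str.isIn a lc) with hma
        have hcond : (!(allow == [])) = true := by simp [ha]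
        simp only [hcond, if_true]
        by_cases hma0 : ma = []
        · simp only [hma0, if_true]
          constructor
          · intro _
            obtain ⟨d, hdm⟩ := List.exists_mem_of_ne_nil md hmd0
            have hdf := List.mem_filter.mp (hmd ▸ hdm)
            simp at hdf
            refine ⟨d, hdf.1, ⟨hdf.2.1, by simpa using hdf.2.2⟩, ?_⟩
            intro a haL hc
            have : a ∈ ma := by
              rw [hma]; simp only [List.mem_filter]
              exact ⟨haL, by simp only [Bool.and_eq_true, Bool.not_eq_true', beq_eq_false_iff_ne]; exact ⟨hc.1, hc.2.1⟩⟩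
            rw [hma0] at this; simp at this
          · intro _; trivial
        · simp only [hma0, if_false]
          rw [List.any_eq_true]
          constructor
          · rintro ⟨d, hdm, hno⟩
            have hdf := List.mem_filter.mp (hmd ▸ hdm)
            simp at hdf
            refine ⟨d, hdf.1, ⟨hdf.2.1, by simpa using hdf.2.2⟩, ?_⟩
            intro a haL hc
            have hma' : a ∈ ma := by
              rw [hma]; simp only [List.mem_filter]
              exact ⟨haL, by simp only [Bool.and_eq_true, Bool.not_eq_true', beq_eq_false_iff_ne]; exact ⟨hc.1, hc.2.1⟩⟩
            have hcont : PySem.Set.contains (ma.foldl (fun ov a => md.foldl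
                (fun ov d => if PySem.Str.isIn d a then PySem.Set.add ov d else ov) ov)
                PySem.Set.empty) d = true := by
              rw [PySem.Set.contains_iff, mem_outer_fold]
              exact Or.inr ⟨a, hma', d, hdm, hc.2.2, rfl⟩
            rw [hcont] at hno
            simp at hno
          · rintro ⟨d, hdL, ⟨hne, hin⟩, hall⟩
            have hdm : d ∈ md := by
              rw [hmd]; simp only [List.mem_filter]
              exact ⟨hdL, by simp only [Bool.and_eq_true, Bool.not_eq_true', beq_eq_false_iff_ne]; exact ⟨hne, hin⟩⟩
            refine ⟨d, hdm, ?_⟩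
            have hcont : PySem.Set.contains (ma.foldl (fun ov a => md.foldl
                (fun ov d => if PySem.Str.isIn d a then PySem.Set.add ov d else ov) ov)
                PySem.Set.empty) d = false := by
              rw [← Bool.not_eq_true, PySem.Set.contains_iff, mem_outer_fold]
              rintro (h0 | ⟨a, hma', d', hd', hc, rfl⟩)
              · simp [PySem.Set.empty] at h0
              · have haf := List.mem_filter.mp (hma ▸ hma')
                simp at haf
                exact hall a haf.1 ⟨haf.2.1, by simpa using haf.2.2, hc⟩
            rw [hcont]; trivial

theorem b_eq_true_iff (wiki_cat : String) (deny allow : List String)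
    (hden : ∀ d ∈ deny, (Char.ofNat 0) ∉ d.toList) :
    should_exclude_wikitext_alt wiki_cat deny allow = true ↔
      ∃ d ∈ deny, (¬ d = "" ∧ PySem.Str.isIn d (PySem.Str.lower wiki_cat) = true) ∧
        ∀ a ∈ allow, ¬(¬ a = "" ∧ PySem.Str.isIn a (PySem.Str.lower wiki_cat) = true ∧
          PySem.Str.isIn d a = true) := by
  unfold should_exclude_wikitext_alt
  set lc := PySem.Str.lower wiki_cat with hlc
  rw [List.any_eq_true]
  constructor
  · rintro ⟨d, hdm, hp⟩
    simp only [Bool.and_eq_true, Bool.not_eq_true', beq_eq_false_iff_ne] at hp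
    obtain ⟨⟨hne, hin⟩, hblob⟩ := hp
    refine ⟨d, hdm, ⟨hne, hin⟩, ?_⟩
    intro a haL hc
    apply absurd hblob
    simp only [Bool.not_eq_false]
    rw [PySem.Str.isIn_iff_infix, PySem.Str.toList_join]
    have htl : ("\x00" : String).toList = [Char.ofNat 0] := rfl
    rw [htl, infix_join_iff _ _ _ (fun h => hne (String.toList_eq_nil_iff.mp h)) (hden d hdm)]
    refine ⟨a.toList, List.mem_map_of_mem (List.mem_filter.mpr ⟨haL, ?_⟩), ?_⟩
    · simp only [Bool.and_eq_true, Bool.not_eq_true', beq_eq_false_iff_ne]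
      exact ⟨hc.1, hc.2.1⟩
    · exact (PySem.Str.isIn_iff_infix d a).mp hc.2.2
  · rintro ⟨d, hdm, ⟨hne, hin⟩, hall⟩
    refine ⟨d, hdm, ?_⟩
    simp only [Bool.and_eq_true, Bool.not_eq_true', beq_eq_false_iff_ne]
    refine ⟨⟨hne, hin⟩, ?_⟩
    rw [← Bool.not_eq_true, PySem.Str.isIn_iff_infix, PySem.Str.toList_join]
    have htl : ("\x00" : String).toList = [Char.ofNat 0] := rfl
    rw [htl, infix_join_iff _ _ _ (fun h => hne (String.toList_eq_nil_iff.mp h)) (hden d hdm)]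
    rintro ⟨l, hl, hinf⟩
    obtain ⟨a, haf, rfl⟩ := List.mem_map.mp hl
    have haf' := List.mem_filter.mp haf
    simp only [Bool.and_eq_true, Bool.not_eq_true', beq_eq_false_iff_ne] at haf'
    exact hall a haf'.1 ⟨haf'.2.1, haf'.2.2, (PySem.Str.isIn_iff_infix d a).mpr hinf⟩

-- ===== VERDICT (by name: the statement is the Claim_ definition above) =====
theorem should_exclude_wikitext_spec : Claim_equal_should_exclude_wikitext := by
  intro wiki_cat deny allow hdom
  unfold Spec_should_exclude_wikitext
  have hden : ∀ d ∈ deny, (Char.ofNat 0) ∉ d.toList := by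
    intro d hd hmem
    unfold Dom_should_exclude_wikitext at hdom
    simp only [Bool.and_eq_true, List.all_eq_true] at hdom
    have := hdom.1.2 d hd
    unfold pvDomStr at this
    rw [List.all_eq_true] at this
    have := this _ hmem
    simp [pvDomChar] at this
  rw [Bool.eq_iff_iff, a_eq_true_iff, b_eq_true_iff _ _ _ hden]
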